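-- pv_equiv track=rewrite | github.com/msg430/Project-Euler | problem676.py | addOneMore
-- ===== SOURCE A (Python) =====
-- def addOneMore(values, usable, newTarget):
--     newUsable = usable.copy()
--     while True:
--         if len(newUsable) == 0:
--             break
--         current = newUsable.pop(0)
--         if values[current] == newTarget:
--             yield [current]
--             continue
--         if values[current] > newTarget:
--             continue
--         if values[current] < newTarget:
--             if len(newUsable) > 0:
--                 newGenerator = addOneMore(values, newUsable, newTarget-values[current])
--                 for further in newGenerator:
--                     yield [current] + further
-- ===== SOURCE B (Python) =====
-- def addOneMore(values, usable, newTarget):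
--     # iterative DFS with an explicit stack of (prefix, items, remaining) frames
--     stack = [([], list(usable), newTarget)]
--     while stack:
--         prefix, items, rem = stack.pop()
--         i = 0
--         while i < len(items):
--             c = items[i]
--             v = values[c]
--             i += 1
--             if v == rem:
--                 yield prefix + [c]
--             elif v < rem and i < len(items):
--                 rest = items[i:]
--                 stack.append((prefix, rest, rem))          # continuation of this frame
--                 stack.append((prefix + [c], rest, rem - v))  # child explored first
--                 break
-- ===== Notes on version B (the rewrite author's own statement) =====
-- stated objective: alternative
-- what changed: Replaces A's recursive generator (pop(0) from a copied list, recursive sub-generators) by a non-recursive DFS over an explicit stack of (prefix, items, remaining) frames, pushing the continuation frame below the child frame to preserve A's yield order.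
import Mathlib
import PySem

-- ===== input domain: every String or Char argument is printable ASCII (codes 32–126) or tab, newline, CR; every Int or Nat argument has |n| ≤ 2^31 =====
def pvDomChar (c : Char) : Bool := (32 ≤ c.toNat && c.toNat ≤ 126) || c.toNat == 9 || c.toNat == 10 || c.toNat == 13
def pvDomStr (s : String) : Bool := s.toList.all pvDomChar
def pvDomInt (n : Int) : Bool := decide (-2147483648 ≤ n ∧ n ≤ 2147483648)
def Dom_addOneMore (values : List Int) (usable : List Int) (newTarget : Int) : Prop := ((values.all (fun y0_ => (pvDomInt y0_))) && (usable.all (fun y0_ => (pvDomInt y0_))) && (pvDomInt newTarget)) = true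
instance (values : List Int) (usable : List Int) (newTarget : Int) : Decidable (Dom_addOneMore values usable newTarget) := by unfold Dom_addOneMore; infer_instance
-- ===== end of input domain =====

-- B replaces A's recursive generator by an explicit iterative stack of DFS frames
-- (same yield order); equivalence is about the list of yielded values.

-- ===== PORT A =====
-- recursion over the head of `usable`; `pop(0)` + loop continuation = recursion on the tail
def addOneMore (values : List Int) (usable : List Int) (newTarget : Int) : List (List Int) :=
  match usable with
  | [] => []
  | current :: rest =>
    match PySem.List.pyGet? values current with
    | none => []  -- IndexError in Python; excluded by Pre_
    | some v =>
      if v = newTarget then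
        [current] :: addOneMore values rest newTarget
      else if v > newTarget then
        addOneMore values rest newTarget
      else if rest.length > 0 then
        (addOneMore values rest (newTarget - v)).map (fun further => current :: further)
          ++ addOneMore values rest newTarget
      else
        addOneMore values rest newTarget

-- ===== PORT B =====
-- a frame is (prefix, items, remaining); the stack's head is its top
-- `bScan` is B's inner while-loop: it returns the values yielded before the `break`
-- and the (at most two) frames pushed at the `break`, in push order.
def bScan (values : List Int) (pre : List Int) (items : List Int) (rem : Int) :
    List (List Int) × List (List Int × List Int × Int) :=
  match items with
  | [] => ([], [])
  | c :: rest =>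
    match PySem.List.pyGet? values c with
    | none => ([], [])  -- IndexError in Python; excluded by Pre_
    | some v =>
      if v = rem then
        let p := bScan values pre rest rem
        ((pre ++ [c]) :: p.1, p.2)
      else if v < rem ∧ rest.length > 0 then
        ([], [(pre, rest, rem), (pre ++ [c], rest, rem - v)])
      else
        bScan values pre rest rem

def bMeasure (stack : List (List Int × List Int × Int)) : Nat :=
  (stack.map (fun f => 3 ^ f.2.1.length)).sum

theorem bScan_measure (values : List Int) (pre : List Int) (items : List Int) (rem : Int) :
    bMeasure (bScan values pre items rem).2 + 1 ≤ 3 ^ items.length := by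
  induction items generalizing pre rem with
  | nil => simp [bScan, bMeasure]
  | cons c rest ih =>
    simp only [bScan]
    rcases PySem.List.pyGet? values c with _ | v
    · simp [bMeasure, Nat.one_le_pow]
    · simp only []
      split_ifs with h1 h2
      · have := ih pre rem
        calc bMeasure (bScan values pre rest rem).2 + 1 ≤ 3 ^ rest.length := ih pre rem
          _ ≤ 3 ^ (c :: rest).length := by
              simp only [List.length_cons]; exact Nat.pow_le_pow_right (by norm_num) (Nat.le_succ _)
      · have h3 : 1 ≤ 3 ^ rest.length := Nat.one_le_pow _ _ (by norm_num)
        simp only [bMeasure, List.map, List.sum_cons, List.sum_nil, List.length_cons, pow_succ]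
        omega
      · calc bMeasure (bScan values pre rest rem).2 + 1 ≤ 3 ^ rest.length := ih pre rem
          _ ≤ 3 ^ (c :: rest).length := by
              simp only [List.length_cons]; exact Nat.pow_le_pow_right (by norm_num) (Nat.le_succ _)

theorem bMeasure_append (s t : List (List Int × List Int × Int)) :
    bMeasure (s ++ t) = bMeasure s + bMeasure t := by
  simp [bMeasure]

theorem bMeasure_reverse (s : List (List Int × List Int × Int)) :
    bMeasure s.reverse = bMeasure s := by
  simp [bMeasure]

-- B's outer while-loop over the stack
def bLoop (values : List Int) (stack : List (List Int × List Int × Int)) : List (List Int) :=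
  match stack with
  | [] => []
  | (pre, items, rem) :: st =>
    let p := bScan values pre items rem
    p.1 ++ bLoop values (p.2.reverse ++ st)
termination_by bMeasure stack
decreasing_by
  have h := bScan_measure values pre items rem
  rw [bMeasure_append, bMeasure_reverse]
  have hc : bMeasure ((pre, items, rem) :: st) = 3 ^ items.length + bMeasure st := by
    simp [bMeasure]
  rw [hc]
  omega

def addOneMore_alt (values : List Int) (usable : List Int) (newTarget : Int) : List (List Int) :=
  bLoop values [([], usable, newTarget)]

-- ===== PRECONDITION & SPEC =====
-- Pre_: every index in `usable` is a valid (possibly negative) Python index into `values`;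
-- outside it, Python's A raises IndexError while draining the generator.
def Pre_addOneMore (values : List Int) (usable : List Int) (newTarget : Int) : Prop :=
  ∀ i ∈ usable, PySem.Raise.InRange values.length i
instance (values : List Int) (usable : List Int) (newTarget : Int) : Decidable (Pre_addOneMore values usable newTarget) := by unfold Pre_addOneMore; infer_instance
def pvWitness_addOneMore : List Int × List Int × Int := ([1, 2, 3], [0, 1, 2], 6)
def Spec_addOneMore (values : List Int) (usable : List Int) (newTarget : Int) (out : List (List Int)) : Prop := out = addOneMore_alt values usable newTarget
instance (values : List Int) (usable : List Int) (newTarget : Int) (out : List (List Int)) : Decidable (Spec_addOneMore values usable newTarget out) := by unfold Spec_addOneMore; infer_instance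

-- ===== CLAIM (what is proved, stated in full; the proofs are below) =====
def Claim_equal_addOneMore : Prop := ∀ (values : List Int) (usable : List Int) (newTarget : Int), Dom_addOneMore values usable newTarget → Pre_addOneMore values usable newTarget → Spec_addOneMore values usable newTarget (addOneMore values usable newTarget)

-- ===== LEMMAS AND PROOFS =====

-- the one invariant: processing a frame (pre, items, rem) on top of `st` yields exactly
-- A's answer for (items, rem) with `pre` prepended, followed by the rest of the stack.
theorem bScan_unfold (values : List Int) (pre : List Int) (items : List Int) (rem : Int)
    (st : List (List Int × List Int × Int)) :
    bLoop values ((pre, items, rem) :: st)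
      = (bScan values pre items rem).1
        ++ bLoop values ((bScan values pre items rem).2.reverse ++ st) := by
  rw [bLoop.eq_def]

theorem bLoop_frame (values : List Int) (items : List Int) :
    ∀ (rem : Int) (pre : List Int) (st : List (List Int × List Int × Int)),
      bLoop values ((pre, items, rem) :: st)
        = (addOneMore values items rem).map (fun f => pre ++ f) ++ bLoop values st := by
  induction items with
  | nil => intro rem pre st; rw [bScan_unfold]; simp [bScan, addOneMore]
  | cons c rest ih =>
    intro rem pre st
    rw [bScan_unfold]
    simp only [bScan, addOneMore]
    rcases PySem.List.pyGet? values c with _ | v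
    · simp
    · simp only []
      have key := ih rem pre st
      rw [bScan_unfold] at key
      by_cases h1 : v = rem
      · -- values[c] == remaining: yield pre ++ [c], keep scanning this frame
        simp only [if_pos h1, List.cons_append, List.map_cons]
        rw [key]
      · by_cases h2 : v > rem
        · have h3 : ¬ (v < rem ∧ rest.length > 0) := by omega
          simp only [if_neg h1, if_pos h2, if_neg h3]
          exact key
        · have hv : v < rem := by omega
          by_cases h4 : rest.length > 0
          · -- branch: push continuation and child; child frame is processed first
            simp only [if_neg h1, if_neg h2, if_pos (And.intro hv h4), if_pos h4,
              List.reverse_cons, List.reverse_nil, List.nil_append, List.cons_append,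
              List.nil_append]
            rw [bScan_unfold]
            have key2 := ih (rem - v) (pre ++ [c]) ((pre, rest, rem) :: st)
            rw [bScan_unfold] at key2
            rw [key2, ih rem pre st]
            simp [List.map_append, List.map_map, Function.comp]
          · have h3 : ¬ (v < rem ∧ rest.length > 0) := by omega
            simp only [if_neg h1, if_neg h2, if_neg h3, if_neg h4]
            exact key

theorem addOneMore_spec_aux (values : List Int) (usable : List Int) (newTarget : Int) :
    addOneMore values usable newTarget = addOneMore_alt values usable newTarget := by
  rw [addOneMore_alt, bLoop_frame]
  simp [bLoop]

-- ===== VERDICT (by name: the statement is the Claim_ definition above) =====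
theorem addOneMore_spec : Claim_equal_addOneMore := by
  intro values usable newTarget _ _
  exact addOneMore_spec_aux values usable newTarget
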